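-- pv_equiv track=rewrite | github.com/mhoelzer/sharding-demo | controller.py | _generate_sharded_data
-- ===== SOURCE A (Python) =====
-- def _generate_sharded_data(count, data):
--     """Split the data into as many pieces as needed."""
--     # divmod = takes int and another arg and to get x num things, first arg reurne dis where we need to split stuff, and rem is ermainder if stuff left over; tells index num, not stuff with data
--     splicenum, rem = divmod(len(data), count)
--     # data is string of w/e; here's text
--     result = [
--         data[
--             splicenum * z:  # if z is 0, it's 0; takes text and puts into segments
--             splicenum * (z + 1)  # 25 * 0+1
--         ] for z in range(count)
--     ]
--     # result = 0-25; 25-50;...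
--     # text blocks in thign
--     # take care of any odd characters
--     # if no remainder, then all is good; else ...
--     if rem > 0:
--         # result last += bigblob[countBackwardsToEndJustThoseCharAndThrowEverythingElse]
--         # -1:issecondtolast
--         result[-1] += data[-rem:]
--
--     return result  # list of data split along index
-- ===== SOURCE B (Python) =====
-- def _generate_sharded_data(count, data):
--     """Split data into count pieces by peeling one chunk off the remaining string at a time."""
--     splicenum = len(data) // count
--     result = []
--     rest = data
--     k = count
--     while k > 1:
--         result.append(rest[:splicenum])
--         rest = rest[splicenum:]
--         k -= 1
--     if k == 1:
--         result.append(rest)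
--     return result
-- ===== Notes on version B (the rewrite author's own statement) =====
-- stated objective: alternative
-- what changed: B replaces A's index-arithmetic comprehension (divmod, absolute slice offsets splicenum*z, plus an `if rem > 0` patch of the last element) by a peel loop that consumes the string: each step appends one splicenum-sized prefix and drops it from the remaining data, and the final step appends the whole remainder as the last chunk, so no remainder arithmetic or patching exists.
import Mathlib
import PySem

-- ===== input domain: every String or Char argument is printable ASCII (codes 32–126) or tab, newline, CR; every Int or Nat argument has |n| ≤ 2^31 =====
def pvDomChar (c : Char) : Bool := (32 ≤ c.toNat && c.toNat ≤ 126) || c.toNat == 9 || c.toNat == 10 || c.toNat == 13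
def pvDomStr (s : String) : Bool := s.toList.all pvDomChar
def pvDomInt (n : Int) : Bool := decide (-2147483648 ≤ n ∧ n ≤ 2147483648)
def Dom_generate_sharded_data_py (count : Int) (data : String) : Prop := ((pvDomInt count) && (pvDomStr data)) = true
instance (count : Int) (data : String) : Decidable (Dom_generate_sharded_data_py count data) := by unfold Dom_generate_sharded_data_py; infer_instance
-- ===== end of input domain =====

-- B replaces A's index-arithmetic comprehension plus remainder patch by a recursion
-- that peels one splicenum-sized prefix off the remaining string per step; the base
-- case returns the whole remainder, so no remainder arithmetic exists.


-- ===== PORT A =====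
-- splicenum, rem = divmod(len(data), count); count ≠ 0 is guaranteed by Pre_.
-- result[-1] += data[-rem:] is ported as dropLast ++ [getLastD ...]; whenever Python
-- reaches that line (rem > 0 forces count > 0) the list is nonempty, matching Python's
-- in-place update of the last element.
def generate_sharded_data_py (count : Int) (data : String) : List String :=
  let s := data.toList
  let splicenum := PySem.Int.floordiv (s.length : Int) count
  let rem := PySem.Int.mod (s.length : Int) count
  let result := (PySem.List.pyRange 0 count 1).map
      (fun z => PySem.List.slice s (some (splicenum * z)) (some (splicenum * (z + 1))))
  let result := if rem > 0 then
      result.dropLast ++ [result.getLastD [] ++ PySem.List.slice s (some (-rem)) none]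
    else result
  result.map String.ofList

-- ===== PORT B =====
-- the while loop: while k > 1 append rest[:splicenum] and set rest = rest[splicenum:], k -= 1;
-- then if k == 1 append the whole remainder.
def pvPeel (q : Int) (k : Int) (rest : List Char) (result : List (List Char)) : List (List Char) :=
  if _h : k > 1 then
    pvPeel q (k - 1) (PySem.List.slice rest (some q) none)
      (result ++ [PySem.List.slice rest none (some q)])
  else if k = 1 then result ++ [rest] else result
  termination_by k.toNat
  decreasing_by omega

def generate_sharded_data_py_alt (count : Int) (data : String) : List String :=
  let splicenum := PySem.Int.floordiv ((data.toList.length : Int)) count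
  (pvPeel splicenum count data.toList []).map String.ofList

-- ===== PRECONDITION & SPEC =====
-- Pre_ excludes only count = 0, where A raises ZeroDivisionError (divmod by zero).
def Pre_generate_sharded_data_py (count : Int) (data : String) : Prop := count ≠ 0
instance (count : Int) (data : String) : Decidable (Pre_generate_sharded_data_py count data) := by unfold Pre_generate_sharded_data_py; infer_instance
def pvWitness_generate_sharded_data_py : Int × String := (3, "abcdefgh")

def Spec_generate_sharded_data_py (count : Int) (data : String) (out : List String) : Prop := out = generate_sharded_data_py_alt count data
instance (count : Int) (data : String) (out : List String) : Decidable (Spec_generate_sharded_data_py count data out) := by unfold Spec_generate_sharded_data_py; infer_instance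

-- ===== CLAIM (what is proved, stated in full; the proofs are below) =====
def Claim_equal_generate_sharded_data_py : Prop := ∀ (count : Int) (data : String), Dom_generate_sharded_data_py count data → Pre_generate_sharded_data_py count data → Spec_generate_sharded_data_py count data (generate_sharded_data_py count data)

-- ===== LEMMAS AND PROOFS =====

-- proof helper: the peel loop's chunks written as a recursion on the count
def pvShed (q : Int) (k : Int) (rest : List Char) : List (List Char) :=
  if _h0 : k ≤ 0 then []
  else if _h1 : k = 1 then [rest]
  else PySem.List.slice rest none (some q) :: pvShed q (k - 1) (PySem.List.slice rest (some q) none)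
  termination_by k.toNat
  decreasing_by omega

-- the loop with accumulator acc computes acc ++ the recursion's chunks
theorem pvPeel_eq_shed (q : Int) : ∀ (n : Nat) (k : Int), k.toNat ≤ n →
    ∀ (rest : List Char) (acc : List (List Char)),
    pvPeel q k rest acc = acc ++ pvShed q k rest := by
  intro n
  induction n with
  | zero =>
    intro k hk rest acc
    rw [pvPeel, dif_neg (by omega), if_neg (by omega), pvShed, dif_pos (by omega),
        List.append_nil]
  | succ n ih =>
    intro k hk rest acc
    by_cases h1 : k > 1
    · rw [pvPeel, dif_pos h1, ih (k - 1) (by omega), List.append_assoc,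
          List.singleton_append]
      conv_rhs => rw [pvShed]
      rw [dif_neg (by omega : ¬ k ≤ 0), dif_neg (by omega : ¬ k = 1)]
    · by_cases h2 : k = 1
      · rw [pvPeel, dif_neg h1, if_pos h2, pvShed, dif_neg (by omega), dif_pos h2]
      · rw [pvPeel, dif_neg h1, if_neg h2, pvShed, dif_pos (by omega), List.append_nil]

-- take (b - a) of (drop a) glued to drop b is drop a  (chunk merging)
theorem pv_chunk_merge (s : List Char) (a b : Nat) (hab : a ≤ b) :
    (s.drop a).take (b - a) ++ s.drop b = s.drop a := by
  have h : s.drop b = (s.drop a).drop (b - a) := by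
    rw [List.drop_drop]; congr 1; omega
  rw [h, List.take_append_drop]

-- Python's n % b is ≤ 0 for a negative divisor b and nonnegative n
theorem pv_fmod_nonpos (n b : Int) (hb : b < 0) : Int.fmod n b ≤ 0 := by
  rw [Int.fmod_eq_emod]
  have h1 : n % b = n % (-b) := (Int.emod_neg n b) ▸ rfl
  have h2 : n % (-b) < -b := Int.emod_lt_of_pos n (by omega)
  have h3 : 0 ≤ n % (-b) := Int.emod_nonneg n (by omega)
  split_ifs with h
  · rcases h with h | h
    · omega
    · have : n % b = 0 := Int.emod_eq_zero_of_dvd h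
      omega
  · omega

-- A's comprehension (with the remainder absorbed into the last chunk) in closed slice form:
-- the peel recursion produces exactly the chunks [q*z : q*(z+1)], last one unbounded.
theorem pvShed_eq_slices (Q : Nat) : ∀ (c : Int), 1 ≤ c → ∀ (s : List Char),
    pvShed (Q : Int) c s = (PySem.List.pyRange 0 c 1).map (fun z =>
      if z = c - 1 then PySem.List.slice s (some ((Q : Int) * z)) none
      else PySem.List.slice s (some ((Q : Int) * z)) (some ((Q : Int) * (z + 1)))) := by
  intro c hc
  induction c, hc using Int.le_induction with
  | base =>
    intro s
    rw [pvShed, dif_neg (by omega), dif_pos rfl,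
        PySem.List.pyRange_one_cons (by omega : (0:Int) < 1),
        PySem.List.pyRange_one_eq_nil (by omega : (1:Int) ≤ 0 + 1),
        List.map_cons, List.map_nil]
    simp [PySem.List.slice_from s (le_refl 0)]
  | succ c hc ih =>
    intro s
    rw [pvShed, dif_neg (by omega), dif_neg (by omega),
        show c + 1 - 1 = c by ring, ih]
    rw [PySem.List.pyRange_one_cons (by omega : (0:Int) < c + 1)]
    rw [List.map_cons]
    congr 1
    · -- head: z = 0
      rw [if_neg (by omega)]
      simp
    · -- tail
      rw [show (0:Int) + 1 = 1 by ring,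
          PySem.List.pyRange_one 1 (c + 1), PySem.List.pyRange_one 0 c,
          show (c + 1 - 1).toNat = (c - 0).toNat by omega,
          List.map_map, List.map_map]
      refine List.map_congr_left ?_
      intro k hk
      have hkc : (k : Int) < c := by
        have := List.mem_range.mp hk
        omega
      simp only [Function.comp_apply]
      have eQ : ∀ (a : Int), 0 ≤ a → ((Q:Int) * a).toNat = Q * a.toNat := by
        intro a ha
        obtain ⟨m, rfl⟩ := Int.eq_ofNat_of_zero_le ha
        rw [show ((Q:Int) * (m:Int)) = ((Q * m : Nat) : Int) by push_cast; ring,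
            Int.toNat_natCast, Int.toNat_natCast]
      by_cases hlast : (1 + (k : Int)) = c
      · rw [if_pos (show (0:Int) + (k:Int) = c - 1 by omega), if_pos hlast,
            PySem.List.slice_from _ (by positivity),
            PySem.List.slice_from _ (by positivity),
            PySem.List.slice_from _ (by positivity),
            List.drop_drop, eQ _ (by positivity), eQ _ (by positivity)]
        congr 1
        simp only [show ((0:Int) + (k:Int)).toNat = k by omega,
                   show ((1:Int) + (k:Int)).toNat = k + 1 by omega,
                   Nat.mul_add, Nat.mul_one]
        omega
      · rw [if_neg (show ¬ (0:Int) + (k:Int) = c - 1 by omega), if_neg hlast,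
            PySem.List.slice_from _ (by positivity),
            PySem.List.slice_toNat _ (by positivity) (by positivity),
            PySem.List.slice_toNat _ (by positivity) (by positivity),
            List.drop_drop, eQ _ (by positivity), eQ _ (by positivity),
            eQ _ (by positivity), eQ _ (by positivity)]
        congr 1
        · simp only [show ((0:Int) + (k:Int)).toNat = k by omega,
                     show ((1:Int) + (k:Int)).toNat = k + 1 by omega,
                     show ((0:Int) + (k:Int) + 1).toNat = k + 1 by omega,
                     show ((1:Int) + (k:Int) + 1).toNat = k + 2 by omega,
                     Nat.mul_add, Nat.mul_one]
          omega
        · simp only [Int.toNat_natCast,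
                     show ((0:Int) + (k:Int)).toNat = k by omega,
                     show ((1:Int) + (k:Int)).toNat = k + 1 by omega,
                     Nat.mul_add, Nat.mul_one]
          rw [Nat.add_comm]

-- ===== VERDICT (by name: the statement is the Claim_ definition above) =====
theorem generate_sharded_data_py_spec : Claim_equal_generate_sharded_data_py := by
  intro count data _ hpre
  show generate_sharded_data_py count data = generate_sharded_data_py_alt count data
  simp only [generate_sharded_data_py, generate_sharded_data_py_alt]
  rw [pvPeel_eq_shed _ count.toNat count le_rfl, List.nil_append]
  set s := data.toList with hs
  set n : Int := (s.length : Int) with hn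
  set q := PySem.Int.floordiv n count with hq
  set r := PySem.Int.mod n count with hrdef
  rcases lt_or_gt_of_ne hpre with hneg | hc
  · -- count < 0: range(count) is empty, rem ≤ 0, A gives []; pvShed gives [] since k ≤ 0
    rw [PySem.List.pyRange_one_eq_nil (by omega)]
    have : ¬ r > 0 := by
      have := pv_fmod_nonpos n count hneg
      simp only [hrdef, PySem.Int.mod]
      omega
    rw [List.map_nil, if_neg this, pvShed, dif_pos (by omega)]
  · -- count ≥ 1
    have hqr : count * q + r = n := Int.mul_fdiv_add_fmod n count
    have hrnn : 0 ≤ r := Int.fmod_nonneg (by positivity) (le_of_lt hc)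
    have hrlt : r < count := Int.fmod_lt_of_pos n hc
    have hqnn : 0 ≤ q := Int.fdiv_nonneg (by positivity) (le_of_lt hc)
    have hbnn : 0 ≤ q * count := mul_nonneg hqnn (le_of_lt hc)
    have hann : 0 ≤ q * (count - 1) := mul_nonneg hqnn (by omega)
    have hbn : q * count = n - r := by linarith [hqr, (mul_comm count q)]
    -- rewrite B with the closed slice form of the peel recursion
    have hQ : q = ((q.toNat : Nat) : Int) := by omega
    rw [hQ] at hbn hann hbnn
    rw [hQ, pvShed_eq_slices q.toNat count hc s]
    -- split range(count) into range(count-1) ++ [count-1]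
    rw [PySem.List.pyRange_one_append 0 (count - 1) count (by omega) (by omega)]
    have hsing : PySem.List.pyRange (count - 1) count 1 = [count - 1] := by
      have h1 := PySem.List.pyRange_one_singleton (count - 1)
      rw [show count - 1 + 1 = count by ring] at h1
      exact h1
    rw [hsing, List.map_append, List.map_append, List.map_cons, List.map_cons,
        List.map_nil, List.map_nil, if_pos rfl]
    rw [show ((q.toNat : Int)) * (count - 1 + 1) = (q.toNat : Int) * count by ring]
    -- on range(count-1) every z has z ≠ count-1, so the peel form picks the bounded slice
    have hpref : ∀ z ∈ PySem.List.pyRange 0 (count - 1) 1,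
        (if z = count - 1 then PySem.List.slice s (some ((q.toNat : Int) * z)) none
         else PySem.List.slice s (some ((q.toNat : Int) * z)) (some ((q.toNat : Int) * (z + 1))))
        = PySem.List.slice s (some ((q.toNat : Int) * z)) (some ((q.toNat : Int) * (z + 1))) := by
      intro z hz
      rw [if_neg]
      have := (PySem.List.mem_pyRange_one).1 hz
      omega
    rw [List.map_congr_left hpref]
    by_cases hr0 : r > 0
    · rw [if_pos hr0, List.dropLast_concat, List.getLastD_concat]
      simp only [List.map_append, List.map_cons, List.map_nil]
      congr 2
      -- last chunk: data[q(c-1):qc] ++ data[-r:]  =  data[q(c-1):]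
      rw [PySem.List.slice_toNat s hann hbnn,
          show (-r) = -((r.toNat : Nat) : Int) by omega,
          PySem.List.slice_from_neg_natCast s r.toNat (by omega),
          PySem.List.slice_from s hann]
      have h1 : s.length - r.toNat = (((q.toNat : Int)) * count).toNat := by omega
      have h2 : (((q.toNat : Int)) * (count - 1)).toNat ≤ (((q.toNat : Int)) * count).toNat := by
        have : ((q.toNat : Int)) * (count - 1) ≤ ((q.toNat : Int)) * count := by nlinarith
        omega
      rw [h1]
      exact congrArg String.ofList (pv_chunk_merge s _ _ h2)
    · rw [if_neg hr0]
      simp only [List.map_append, List.map_cons, List.map_nil]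
      congr 2
      -- r = 0: data[q(c-1):qc] is already data[q(c-1):]
      rw [PySem.List.slice_toNat s hann hbnn, PySem.List.slice_from s hann]
      refine congrArg String.ofList (List.take_of_length_le ?_)
      rw [List.length_drop]
      omega
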